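-- pv_equiv track=rewrite | github.com/Melkaz/Pyg | pyg.py | get_common_cols
-- ===== SOURCE A (Python) =====
-- from collections import OrderedDict
--
-- def get_common_cols(dicts_list):
--     keys = []
--     for dict_list in dicts_list:
--         for key in dict_list.keys():
--             keys.append(key)
--
--     counted_keys = OrderedDict()
--     for key in keys:
--         try:
--             counted_keys[key] += 1
--         except KeyError:
--             counted_keys[key] = 1
--
--     common_cols = [key for key in counted_keys.keys() if counted_keys[key] == len(dicts_list)]
--
--     return(common_cols)
-- ===== SOURCE B (Python) =====
-- def get_common_cols(dicts_list):
--     if not dicts_list: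
--         return []
--     common = set(dicts_list[0].keys())
--     for d in dicts_list[1:]:
--         common &= set(d.keys())
--     return [k for k in dicts_list[0] if k in common]
-- ===== Notes on version B (the rewrite author's own statement) =====
-- stated objective: idiomatic
-- what changed: Replaced the collect-all-keys-then-count-occurrences pass (OrderedDict counter plus try/except) with a running set intersection of key-sets, then one ordered filter over the first dict's keys.
import Mathlib
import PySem

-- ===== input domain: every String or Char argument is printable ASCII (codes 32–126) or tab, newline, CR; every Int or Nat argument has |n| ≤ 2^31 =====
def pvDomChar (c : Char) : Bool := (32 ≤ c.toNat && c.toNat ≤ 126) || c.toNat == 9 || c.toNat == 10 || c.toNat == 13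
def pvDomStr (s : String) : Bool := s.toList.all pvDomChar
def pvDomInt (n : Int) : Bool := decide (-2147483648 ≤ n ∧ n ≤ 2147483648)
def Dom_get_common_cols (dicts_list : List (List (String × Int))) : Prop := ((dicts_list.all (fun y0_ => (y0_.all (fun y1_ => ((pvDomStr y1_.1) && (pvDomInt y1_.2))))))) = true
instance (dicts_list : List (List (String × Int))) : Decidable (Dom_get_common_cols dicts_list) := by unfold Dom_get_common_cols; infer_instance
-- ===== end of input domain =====

-- B replaces A's collect-then-count pass (OrderedDict counter) with a running set
-- intersection of key-sets followed by one ordered filter over the first dict's keys (idiomatic).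


-- ===== PORT A =====
-- dict.keys() of an association-list dict: distinct keys, first-occurrence order
def pvKeysOf (d : List (String × Int)) : List String :=
  PySem.Set.ofList (d.map Prod.fst)

def get_common_cols (dicts_list : List (List (String × Int))) : List String :=
  -- keys = []; for dict_list in dicts_list: for key in dict_list.keys(): keys.append(key)
  let keys := dicts_list.foldl
    (fun ks d => (pvKeysOf d).foldl (fun ks k => ks ++ [k]) ks) []
  -- counted_keys = OrderedDict(); for key in keys: try counted_keys[key] += 1 except KeyError: counted_keys[key] = 1
  let counted := keys.foldl (fun cd k => cd.modify k 0 (· + 1)) PySem.Dict.empty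
  -- [key for key in counted_keys.keys() if counted_keys[key] == len(dicts_list)]
  counted.keys.filter (fun k => counted.getD k 0 == (dicts_list.length : Int))

-- ===== PORT B =====
def get_common_cols_alt (dicts_list : List (List (String × Int))) : List String :=
  match dicts_list with
  | [] => []
  | d0 :: rest =>
    -- common = set(dicts_list[0].keys()); for d in dicts_list[1:]: common &= set(d.keys())
    let common := rest.foldl
      (fun s d => PySem.Set.inter s (PySem.Set.ofList (d.map Prod.fst)))
      (PySem.Set.ofList (d0.map Prod.fst))
    -- [k for k in dicts_list[0] if k in common]
    (pvKeysOf d0).filter (fun k => PySem.Set.contains common k)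

-- ===== PRECONDITION & SPEC =====
def Spec_get_common_cols (dicts_list : List (List (String × Int))) (out : List String) : Prop := out = get_common_cols_alt dicts_list
instance (dicts_list : List (List (String × Int))) (out : List String) : Decidable (Spec_get_common_cols dicts_list out) := by unfold Spec_get_common_cols; infer_instance

-- ===== CLAIM (what is proved, stated in full; the proofs are below) =====
def Claim_equal_get_common_cols : Prop := ∀ (dicts_list : List (List (String × Int))), Dom_get_common_cols dicts_list → Spec_get_common_cols dicts_list (get_common_cols dicts_list)

-- ===== LEMMAS AND PROOFS =====

-- A's appended key list is the concatenation of the per-dict key lists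
theorem pv_keys_flat (l : List (List (String × Int))) :
    l.foldl (fun ks d => (pvKeysOf d).foldl (fun ks k => ks ++ [k]) ks) []
      = l.flatMap pvKeysOf := by
  have h : ∀ (init : List String),
      l.foldl (fun ks d => (pvKeysOf d).foldl (fun ks k => ks ++ [k]) ks) init
        = init ++ l.flatMap pvKeysOf := by
    induction l with
    | nil => intro init; simp
    | cons d t ih =>
      intro init
      rw [List.foldl_cons, PySem.List.foldl_append_singleton, ih, List.flatMap_cons,
        List.append_assoc]
  simpa using h []

-- membership in B's running intersection
theorem pv_mem_inter_fold (rest : List (List (String × Int))) (s : PySem.Set String) (k : String) :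
    (k ∈ rest.foldl (fun s d => PySem.Set.inter s (PySem.Set.ofList (d.map Prod.fst))) s)
      ↔ (k ∈ s ∧ ∀ d ∈ rest, k ∈ d.map Prod.fst) := by
  induction rest generalizing s with
  | nil => simp
  | cons d t ih =>
    rw [List.foldl_cons, ih]
    simp [PySem.Set.mem_inter, PySem.Set.mem_ofList, and_assoc]

-- count of k in the flattened key list = number of dicts containing k (each pvKeysOf is Nodup)
theorem pv_count_flat (l : List (List (String × Int))) (k : String) :
    (l.flatMap pvKeysOf).count k
      = l.countP (fun d => decide (k ∈ d.map Prod.fst)) := by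
  induction l with
  | nil => simp
  | cons d t ih =>
    rw [List.flatMap_cons, List.count_append, ih, List.countP_cons]
    simp only [pvKeysOf]
    by_cases h : k ∈ d.map Prod.fst
    · rw [List.count_eq_one_of_mem (PySem.Set.nodup_ofList _)
        (by simpa [PySem.Set.mem_ofList] using h)]
      simp [h, Nat.add_comm]
    · rw [List.count_eq_zero_of_not_mem (by simpa [PySem.Set.mem_ofList] using h)]
      simp [h]

-- A's boolean test "count == len(dicts_list)" decides "k is in every dict"
theorem pv_pred_eq (l : List (List (String × Int))) (k : String) :
    (((l.flatMap pvKeysOf).count k : Int) == (l.length : Int))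
      = decide (∀ d ∈ l, k ∈ d.map Prod.fst) := by
  rw [pv_count_flat]
  rcases Decidable.em (∀ d ∈ l, k ∈ d.map Prod.fst) with h | h
  · have he : l.countP (fun d => decide (k ∈ d.map Prod.fst)) = l.length :=
      List.countP_eq_length.mpr (fun a ha => decide_eq_true (h a ha))
    rw [he, decide_eq_true h, beq_iff_eq]
  · have hne : l.countP (fun d => decide (k ∈ d.map Prod.fst)) ≠ l.length := by
      intro he
      exact h (fun d hd => of_decide_eq_true (List.countP_eq_length.mp he d hd))
    rw [decide_eq_false h, beq_eq_false_iff_ne]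
    intro he; exact hne (by exact_mod_cast he)

-- ===== VERDICT (by name: the statement is the Claim_ definition above) =====
theorem get_common_cols_spec : Claim_equal_get_common_cols := by
  intro l _
  show get_common_cols l = get_common_cols_alt l
  cases l with
  | nil => rfl
  | cons d0 rest =>
    simp only [get_common_cols, get_common_cols_alt, pv_keys_flat]
    set kf := (d0 :: rest).flatMap pvKeysOf with hkf
    -- A side: counted.keys and counted.getD in closed form
    rw [PySem.Dict.keys_foldl_modify]
    have hA : ∀ k, ((kf.foldl (fun cd k => cd.modify k 0 (· + 1)) PySem.Dict.empty).getD k 0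
          == ((d0 :: rest).length : Int))
        = decide (∀ d ∈ d0 :: rest, k ∈ d.map Prod.fst) := by
      intro k
      rw [PySem.Dict.getD_foldl_modify_add_one, PySem.Dict.getD_empty, zero_add, ← pv_pred_eq]
    simp only [hA]
    -- the dedup of the flattened keys is d0's keys followed by keys new to d0
    have hset : PySem.Set.update (PySem.Dict.empty : PySem.Dict String Int).keys kf
        = pvKeysOf d0 ++ (PySem.Set.ofList (rest.flatMap pvKeysOf)).filter
            (fun y => !(PySem.Set.contains (pvKeysOf d0) y)) := by
      rw [PySem.Dict.keys_empty, PySem.Set.update_nil_left, hkf, List.flatMap_cons,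
        PySem.Set.ofList_append]
      simp only [pvKeysOf]
      rw [PySem.Set.ofList_ofList, PySem.Set.update_eq_append_filter]
    rw [hset, List.filter_append]
    -- keys absent from d0 never pass A's test
    have hnil : ((PySem.Set.ofList (rest.flatMap pvKeysOf)).filter
          (fun y => !(PySem.Set.contains (pvKeysOf d0) y))).filter
          (fun k => decide (∀ d ∈ d0 :: rest, k ∈ d.map Prod.fst)) = [] := by
      rw [List.filter_eq_nil_iff]
      intro k hk
      have hnot : k ∉ pvKeysOf d0 := by
        intro hm
        have h2 := (List.mem_filter.mp hk).2
        rw [(PySem.Set.contains_iff (pvKeysOf d0) k).mpr hm] at h2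
        exact absurd h2 (by decide)
      intro hall
      have hall' := of_decide_eq_true hall
      exact hnot (by simpa [pvKeysOf, PySem.Set.mem_ofList] using hall' d0 (List.mem_cons_self))
    rw [hnil, List.append_nil]
    -- B side: the membership test of the running intersection decides the same predicate
    apply Eq.symm
    apply List.filter_congr
    intro k hk
    have hk0 : k ∈ d0.map Prod.fst := by
      simpa [pvKeysOf, PySem.Set.mem_ofList] using hk
    rcases Decidable.em (∀ d ∈ rest, k ∈ d.map Prod.fst) with h | h
    · have : k ∈ rest.foldl (fun s d => PySem.Set.inter s (PySem.Set.ofList (d.map Prod.fst)))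
          (PySem.Set.ofList (d0.map Prod.fst)) :=
        (pv_mem_inter_fold rest _ k).mpr ⟨by simpa [PySem.Set.mem_ofList] using hk0, h⟩
      rw [(PySem.Set.contains_iff _ k).mpr this]
      symm; rw [decide_eq_true_iff]
      intro d hd
      rcases List.mem_cons.mp hd with rfl | hd'
      · exact hk0
      · exact h d hd'
    · have hnm : k ∉ rest.foldl (fun s d => PySem.Set.inter s (PySem.Set.ofList (d.map Prod.fst)))
          (PySem.Set.ofList (d0.map Prod.fst)) := by
        intro hm
        exact h ((pv_mem_inter_fold rest _ k).mp hm).2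
      have hc : PySem.Set.contains (rest.foldl
          (fun s d => PySem.Set.inter s (PySem.Set.ofList (d.map Prod.fst)))
          (PySem.Set.ofList (d0.map Prod.fst))) k = false := by
        cases hcc : PySem.Set.contains (rest.foldl
            (fun s d => PySem.Set.inter s (PySem.Set.ofList (d.map Prod.fst)))
            (PySem.Set.ofList (d0.map Prod.fst))) k with
        | false => rfl
        | true => exact absurd ((PySem.Set.contains_iff _ k).mp hcc) hnm
      rw [hc]
      symm; rw [decide_eq_false_iff_not]
      intro hall
      exact h (fun d hd => hall d (List.mem_cons_of_mem _ hd))
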